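-- pv_equiv track=rewrite | github.com/philophilo/yummy_api | views.py | check_crap
-- ===== SOURCE A (Python) =====
-- def check_crap(val):
--     split_val = val.split(" ")
--     splits = len(split_val)
--     zeros = 0
--     for i in split_val:
--         if len(i) == 0:
--             zeros+=1
--     if zeros == splits:
--         return False
--     return True
-- ===== SOURCE B (Python) =====
-- def check_crap(val):
--     return any(c != ' ' for c in val)
-- ===== Notes on version B (the rewrite author's own statement) =====
-- stated objective: simpler
-- what changed: B scans the characters directly and short-circuits on the first non-space instead of building the space-split list and counting its empty segments.
import Mathlib
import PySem

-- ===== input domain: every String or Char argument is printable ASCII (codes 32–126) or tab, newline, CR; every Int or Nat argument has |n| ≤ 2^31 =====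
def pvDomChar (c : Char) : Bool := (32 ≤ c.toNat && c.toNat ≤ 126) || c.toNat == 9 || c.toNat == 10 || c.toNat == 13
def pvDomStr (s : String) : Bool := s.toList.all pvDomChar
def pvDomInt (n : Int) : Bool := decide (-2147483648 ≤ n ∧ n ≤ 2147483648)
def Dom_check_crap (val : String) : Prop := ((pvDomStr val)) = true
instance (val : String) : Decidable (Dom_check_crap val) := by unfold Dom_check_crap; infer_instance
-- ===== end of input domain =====

-- B replaces A's split-on-space-and-count-empty-segments loop with a direct
-- character scan that short-circuits on the first non-space (objective: simpler).

-- ===== PORT A =====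
def check_crap (val : String) : Bool :=
  let split_val := PySem.Chars.splitOn val.toList [' ']
  let splits := split_val.length
  let zeros := split_val.foldl (fun z i => if i.length = 0 then z + 1 else z) 0
  if zeros = splits then false else true

-- ===== PORT B =====
def check_crap_alt (val : String) : Bool :=
  val.toList.any (fun c => c != ' ')

-- ===== PRECONDITION & SPEC =====
def Spec_check_crap (val : String) (out : Bool) : Prop := out = check_crap_alt val
instance (val : String) (out : Bool) : Decidable (Spec_check_crap val out) := by unfold Spec_check_crap; infer_instance

-- ===== CLAIM (what is proved, stated in full; the proofs are below) =====
def Claim_equal_check_crap : Prop := ∀ (val : String), Dom_check_crap val → Spec_check_crap val (check_crap val)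

-- ===== LEMMAS AND PROOFS =====

-- counting loop = countP
theorem foldl_count_empty (l : List (List Char)) (n : Nat) :
    l.foldl (fun z i => if i.length = 0 then z + 1 else z) n
      = n + l.countP (fun i => i.length = 0) := by
  induction l generalizing n with
  | nil => simp
  | cons x xs ih =>
      simp only [List.foldl, List.countP_cons, ih]
      by_cases h : x.length = 0 <;> simp [h] <;> omega

-- characterisation of splitOn.go with separator [' ']: all produced segments
-- are empty iff the accumulated state is empty and the remaining input is all spaces
theorem go_all_empty (fuel : Nat) (l cur : List Char) (acc : List (List Char))
    (hf : l.length <= fuel) :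
    ((∀ seg ∈ PySem.Chars.splitOn.go [' '] fuel l cur acc, seg = ([] : List Char)) ↔
      ((∀ seg ∈ acc, seg = ([] : List Char)) ∧ cur = [] ∧ ∀ c ∈ l, c = ' ')) := by
  induction fuel generalizing l cur acc with
  | zero =>
      have hl : l = [] := List.eq_nil_of_length_eq_zero (Nat.le_zero.mp hf)
      subst hl
      simp only [PySem.Chars.splitOn.go, List.append_nil, List.mem_reverse,
        List.mem_cons]
      constructor
      · intro h
        exact ⟨fun s hs => h s (Or.inr hs), by
          simpa [List.reverse_eq_nil_iff] using h cur.reverse (Or.inl rfl), by simp⟩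
      · rintro ⟨h1, h2, -⟩ s hs
        rcases hs with hs | hs
        · subst hs h2; simp
        · exact h1 s hs
  | succ fuel ih =>
      cases l with
      | nil =>
          simp only [PySem.Chars.splitOn.go, List.mem_reverse, List.mem_cons]
          constructor
          · intro h
            exact ⟨fun s hs => h s (Or.inr hs), by
              simpa [List.reverse_eq_nil_iff] using h cur.reverse (Or.inl rfl), by simp⟩
          · rintro ⟨h1, h2, -⟩ s hs
            rcases hs with hs | hs
            · subst hs h2; simp
            · exact h1 s hs
      | cons c rest =>
          simp only [PySem.Chars.splitOn.go]
          by_cases hc : c = ' '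
          · subst hc
            have hpre : ([' '] : List Char).isPrefixOf (' ' :: rest) = true := by
              simp [List.isPrefixOf]
            rw [if_pos hpre]
            have hf' : rest.length <= fuel := by
              simpa using Nat.le_of_succ_le_succ hf
            simp only [List.length_cons, List.length_nil, List.drop_succ_cons,
              List.drop_zero, Nat.zero_add]
            rw [ih rest [] _ hf']
            constructor
            · rintro ⟨h1, -, h3⟩
              refine ⟨fun s hs => h1 s (List.mem_cons_of_mem _ hs), ?_, fun c hcm => ?_⟩
              · simpa [List.reverse_eq_nil_iff] using h1 cur.reverse List.mem_cons_self
              · rcases List.mem_cons.mp hcm with h | h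
                · exact h
                · exact h3 c h
            · rintro ⟨h1, h2, h3⟩
              refine ⟨fun s hs => ?_, rfl, fun c hcm => h3 c (List.mem_cons_of_mem _ hcm)⟩
              rcases List.mem_cons.mp hs with hs | hs
              · subst hs h2; simp
              · exact h1 s hs
          · have hpre : ([' '] : List Char).isPrefixOf (c :: rest) = false := by
              simp only [List.isPrefixOf, Bool.and_true]
              exact beq_eq_false_iff_ne.mpr (fun h => hc (Eq.symm h))
            rw [if_neg (by simp [hpre])]
            have hf' : rest.length <= fuel := by
              simpa using Nat.le_of_succ_le_succ hf
            rw [ih rest (c :: cur) acc hf']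
            simp [hc]

-- ===== VERDICT (by name: the statement is the Claim_ definition above) =====
theorem check_crap_spec : Claim_equal_check_crap := by
  intro val _
  unfold Spec_check_crap check_crap check_crap_alt PySem.Chars.splitOn
  simp only [foldl_count_empty, Nat.zero_add]
  have h := go_all_empty (val.toList.length + 1) val.toList [] [] (by omega)
  by_cases hall : ∀ c ∈ val.toList, c = ' '
  · have hseg := h.mpr ⟨by simp, rfl, hall⟩
    rw [if_pos (List.countP_eq_length.mpr (fun a ha => by simp [hseg a ha]))]
    symm
    simp only [List.any_eq_false]
    intro c hc
    simp [hall c hc]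
  · have hseg : ¬ ∀ seg ∈ PySem.Chars.splitOn.go [' '] (val.toList.length + 1) val.toList [] [], seg = ([] : List Char) := by
      intro hs
      exact hall (h.mp hs).2.2
    rw [if_neg (fun heq => hseg (fun a ha => by
      have := List.countP_eq_length.mp heq a ha
      simpa using this))]
    symm
    push Not at hall
    obtain ⟨c, hc, hcs⟩ := hall
    simp only [List.any_eq_true]
    exact ⟨c, hc, by simp [hcs]⟩
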